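-- pv_equiv track=rewrite | github.com/yahiaakkazi/python | Chapitre4.py | indice_min
-- ===== SOURCE A (Python) =====
-- def indice_min(a: [float]) -> int:
--     assert len(a) > 0
--     b=a[0]
--     L=0
--     for i in range(0,len(a)):
--         if a[i]<=b:
--             L=i
--             b=a[i]
--     return L
-- ===== SOURCE B (Python) =====
-- def indice_min(a: [float]) -> int:
--     assert len(a) > 0
--     m = min(a)
--     for i in range(len(a) - 1, -1, -1):
--         if a[i] == m:
--             return i
-- ===== Notes on version B (the rewrite author's own statement) =====
-- stated objective: simpler
-- what changed: Replaces the fused single scan carrying a running (minimum, last-index) pair with two plain passes: compute m = min(a), then scan indices from the end and return the first index where a[i] == m (the last occurrence, matching A's <= tie-breaking).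
import Mathlib
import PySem

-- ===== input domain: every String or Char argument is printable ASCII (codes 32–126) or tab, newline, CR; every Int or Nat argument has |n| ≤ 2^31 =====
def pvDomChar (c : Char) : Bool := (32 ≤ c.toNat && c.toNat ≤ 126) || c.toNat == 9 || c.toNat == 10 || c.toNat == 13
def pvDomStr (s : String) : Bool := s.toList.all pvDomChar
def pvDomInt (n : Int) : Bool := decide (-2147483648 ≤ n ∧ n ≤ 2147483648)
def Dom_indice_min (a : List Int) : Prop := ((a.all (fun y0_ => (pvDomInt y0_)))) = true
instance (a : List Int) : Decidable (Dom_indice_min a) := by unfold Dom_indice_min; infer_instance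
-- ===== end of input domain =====

-- B replaces A's fused scan (running minimum + last index) by two plain passes:
-- m = min(a), then the first index from the END with a[i] == m. Same O(n) cost; simpler.

-- ===== PORT A =====
-- assert len(a) > 0 raises AssertionError on [] — those inputs are excluded by Pre_indice_min;
-- every pyGetD index below is in range on the admitted inputs, so the default 0 is never used.
def indice_min (a : List Int) : Int :=
  -- state (b, L), started as (a[0], 0); the loop body updates it exactly as A does
  ((PySem.List.pyRange 0 (a.length : Int) 1).foldl
      (fun (s : Int × Int) i =>
        if PySem.List.pyGetD a i 0 ≤ s.1 then (PySem.List.pyGetD a i 0, i) else s)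
      (PySem.List.pyGetD a 0 0, 0)).2

-- ===== PORT B =====
-- the backward 'for i in range(len(a)-1, -1, -1): if a[i] == m: return i' loop of Source B;
-- the [] case is unreachable in Source B (m = min(a) always occurs in a)
def findFromBack (a : List Int) (m : Int) : List Int → Int
  | [] => 0
  | i :: rest => if PySem.List.pyGetD a i 0 = m then i else findFromBack a m rest

def indice_min_alt (a : List Int) : Int :=
  match a with
  | [] => 0                                               -- assert fails in Python; excluded by Pre_indice_min
  | h :: t =>
    let m := t.foldl min h                                -- m = min(a)  (PySem.List.min?_id_cons)
    findFromBack (h :: t) m (PySem.List.pyRange (((h :: t).length : Int) - 1) (-1) (-1))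

-- ===== PRECONDITION & SPEC =====
-- Pre_ excludes exactly the empty list, on which A's 'assert len(a) > 0' raises AssertionError.
def Pre_indice_min (a : List Int) : Prop := a ≠ []
instance (a : List Int) : Decidable (Pre_indice_min a) := by unfold Pre_indice_min; infer_instance
def pvWitness_indice_min : List Int := [3, 1, 2, 1]

def Spec_indice_min (a : List Int) (out : Int) : Prop := out = indice_min_alt a
instance (a : List Int) (out : Int) : Decidable (Spec_indice_min a out) := by unfold Spec_indice_min; infer_instance

-- ===== CLAIM (what is proved, stated in full; the proofs are below) =====
def Claim_equal_indice_min : Prop := ∀ (a : List Int), Dom_indice_min a → Pre_indice_min a → Spec_indice_min a (indice_min a)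

-- ===== LEMMAS AND PROOFS =====

-- Nat-indexed reformulations of the two loops (proof-side only)
def stepN (a : List Int) (s : Int × Int) (k : Nat) : Int × Int :=
  if a.getD k 0 ≤ s.1 then (a.getD k 0, (k : Int)) else s

def stateN (h : Int) (t : List Int) : Int × Int :=
  (List.range (h :: t).length).foldl (stepN (h :: t)) (h, 0)

def findN (a : List Int) (m : Int) : List Nat → Int
  | [] => 0
  | k :: rest => if a.getD k 0 = m then (k : Int) else findN a m rest

lemma bridgeA (h : Int) (t : List Int) : indice_min (h :: t) = (stateN h t).2 := by
  unfold indice_min stateN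
  rw [PySem.List.pyRange_zero_nat, List.foldl_map]
  simp only [PySem.List.pyGetD_natCast, PySem.List.pyGetD_ofNat', List.getD_cons_zero]
  rfl

lemma backRange (n : Nat) :
    PySem.List.pyRange ((n : Int) - 1) (-1) (-1)
      = ((List.range n).reverse).map (fun (k : Nat) => (k : Int)) := by
  have hmap : PySem.List.pyRange ((n : Int) - 1) (-1) (-1)
      = (List.range n).map (fun (k : Nat) => (n : Int) - 1 - (k : Int)) := by
    unfold PySem.List.pyRange
    cases n with
    | zero => norm_num
    | succ m =>
      have h2 : (-1 : Int) < ((m + 1 : Nat) : Int) - 1 := by push_cast; omega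
      rw [if_neg (by decide), if_neg (by decide), if_pos h2]
      have hc : ((((m + 1 : Nat) : Int) - 1) - (-1) + -(-1) - 1) / -(-1) = ((m + 1 : Nat) : Int) := by
        push_cast; norm_num
      rw [hc, Int.toNat_natCast]
      apply List.map_congr_left
      intro k _
      push_cast; ring
  rw [hmap]
  apply List.ext_getElem
  · simp
  · intro i h1 h2
    simp only [List.getElem_map, List.getElem_reverse, List.length_range, List.getElem_range]
    simp only [List.length_map, List.length_range] at h1
    omega

lemma findBridge (a : List Int) (m : Int) (l : List Nat) :
    findFromBack a m (l.map (fun (k : Nat) => (k : Int))) = findN a m l := by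
  induction l with
  | nil => rfl
  | cons k rest ih =>
    simp only [List.map_cons, findFromBack, findN, PySem.List.pyGetD_natCast, ih]

lemma bridgeB (h : Int) (t : List Int) :
    indice_min_alt (h :: t) = findN (h :: t) (t.foldl min h) ((List.range (h :: t).length).reverse) := by
  simp only [indice_min_alt, backRange, findBridge]

lemma getD_snoc (l : List Int) (x d : Int) : (l ++ [x]).getD l.length d = x := by
  simp [List.getD_eq_getElem?_getD]

lemma findN_congr (a a' : List Int) (m : Int) (l : List Nat)
    (hag : ∀ k ∈ l, a.getD k 0 = a'.getD k 0) : findN a m l = findN a' m l := by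
  induction l with
  | nil => rfl
  | cons k rest ih =>
    simp only [findN, hag k (by simp)]
    rw [ih (fun k hk => hag k (by simp [hk]))]

lemma mainN (t : List Int) (h : Int) :
    (stateN h t).1 = t.foldl min h ∧
    (stateN h t).2 = findN (h :: t) (t.foldl min h) ((List.range (h :: t).length).reverse) := by
  induction t using List.reverseRecOn with
  | nil => simp [stateN, stepN, findN, List.range_one]
  | append_singleton t' x ih =>
    obtain ⟨ih1, ih2⟩ := ih
    have hcons : h :: (t' ++ [x]) = (h :: t') ++ [x] := by simp
    have hlen : (h :: (t' ++ [x])).length = (h :: t').length + 1 := by simp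
    have hfold : stateN h (t' ++ [x]) = stepN ((h :: t') ++ [x]) (stateN h t') (h :: t').length := by
      unfold stateN
      rw [hlen, List.range_succ, List.foldl_append, hcons]
      simp only [List.foldl_cons, List.foldl_nil]
      congr 1
      apply PySem.List.foldl_congr_mem
      intro acc k hk
      have hklt : k < (h :: t').length := by simpa using hk
      unfold stepN
      rw [List.getD_append _ _ _ _ hklt]
    have hx : ((h :: t') ++ [x]).getD (h :: t').length 0 = x := getD_snoc _ x 0
    have hmin : List.foldl min h (t' ++ [x]) = min (List.foldl min h t') x := by
      rw [List.foldl_append]; rfl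
    have hrev : (List.range (h :: (t' ++ [x])).length).reverse
        = (h :: t').length :: (List.range (h :: t').length).reverse := by
      rw [hlen, List.range_succ]; simp
    by_cases hxb : x ≤ List.foldl min h t'
    · have hm : min (List.foldl min h t') x = x := min_eq_right hxb
      constructor
      · rw [hfold, hmin, hm]
        unfold stepN
        rw [hx, ih1]
        simp [hxb]
      · rw [hfold, hmin, hm, hrev]
        unfold stepN findN
        rw [hcons, hx, ih1]
        simp [hxb]
    · have hbx : List.foldl min h t' < x := lt_of_not_ge hxb
      have hm : min (List.foldl min h t') x = List.foldl min h t' := min_eq_left (le_of_lt hbx)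
      constructor
      · rw [hfold, hmin, hm]
        unfold stepN
        rw [hx, ih1]
        simp [hxb, ih1]
      · rw [hfold, hmin, hm, hrev]
        unfold stepN findN
        rw [hcons, hx, ih1]
        have hne : ¬ (x = List.foldl min h t') := by omega
        simp only [hxb, if_false, hne]
        rw [findN_congr ((h :: t') ++ [x]) (h :: t') (List.foldl min h t')
              ((List.range (h :: t').length).reverse)
              (by intro k hk
                  have hklt : k < (h :: t').length := by simpa using hk
                  rw [List.getD_append _ _ _ _ hklt])]
        exact ih2

-- ===== VERDICT (by name: the statement is the Claim_ definition above) =====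
theorem indice_min_spec : Claim_equal_indice_min := by
  intro a _ hpre
  match a with
  | [] => exact absurd rfl hpre
  | h :: t =>
    unfold Spec_indice_min
    rw [bridgeA, bridgeB]
    exact (mainN t h).2
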